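-- pv_equiv track=rewrite | github.com/spegesilden/kattis | ferryloading4/ferryloading4.py | loadCars
-- ===== SOURCE A (Python) =====
-- def loadCars(L, q):
--     newq = q[::]
--     if len(newq) == 0:
--         return []
--     elif newq[0] > L:
--         del newq[0]
--     l = 0
--     while len(newq) > 0 and l + newq[0] <= L:
--         l += newq[0]
--         del newq[0]
--     return newq
-- ===== SOURCE B (Python) =====
-- def loadCars(L, q):
--     if not q:
--         return []
--     start = 1 if q[0] > L else 0
--     sub = q[start:]
--     sums = []
--     t = 0
--     for x in sub:
--         t += x
--         sums.append(t)
--     cut = len(sub)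
--     for i, s in enumerate(sums):
--         if s > L:
--             cut = i
--             break
--     return sub[cut:]
-- ===== Notes on version B (the rewrite author's own statement) =====
-- stated objective: alternative
-- what changed: Replaces A's fused delete-from-front while loop (repeated del newq[0] with a running load) by a table-then-scan decomposition: build the full prefix-sum table of the queue after the oversize-first-car skip, scan it for the first sum exceeding L, and return one slice from that cut index.
import Mathlib
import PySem

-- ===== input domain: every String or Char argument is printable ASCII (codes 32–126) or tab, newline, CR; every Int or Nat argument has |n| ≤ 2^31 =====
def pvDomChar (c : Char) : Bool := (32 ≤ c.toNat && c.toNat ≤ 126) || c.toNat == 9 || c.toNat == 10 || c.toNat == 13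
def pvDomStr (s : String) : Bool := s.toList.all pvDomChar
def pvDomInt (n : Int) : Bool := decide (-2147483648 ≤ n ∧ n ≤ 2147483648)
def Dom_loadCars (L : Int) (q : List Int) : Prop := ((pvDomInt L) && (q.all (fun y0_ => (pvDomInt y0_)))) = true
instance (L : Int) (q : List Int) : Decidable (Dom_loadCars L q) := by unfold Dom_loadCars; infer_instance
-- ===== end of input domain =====

-- B replaces A's fused delete-while-accumulating loop by prefix-sum table + first-exceeding scan + one slice (alternative decomposition, same result).

-- ===== PORT A =====
-- the while loop of A: running load l, pop front while it still fits
def loadCarsLoop (L : Int) : Int → List Int → List Int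
  | _, [] => []
  | l, x :: xs => if l + x ≤ L then loadCarsLoop L (l + x) xs else x :: xs

def loadCars (L : Int) (q : List Int) : List Int :=
  match q with
  | [] => []
  | x :: xs => if x > L then loadCarsLoop L 0 xs else loadCarsLoop L 0 (x :: xs)

-- ===== PORT B =====
-- running prefix sums of the list, starting from accumulator t
def prefixSums (t : Int) : List Int → List Int
  | [] => []
  | x :: xs => (t + x) :: prefixSums (t + x) xs

-- index of the first element > L, if any (the break-on-first-exceeding scan)
def firstGT (L : Int) : List Int → Option Nat
  | [] => none
  | s :: ss => if s > L then some 0 else (firstGT L ss).map (· + 1)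

def loadCars_alt (L : Int) (q : List Int) : List Int :=
  match q with
  | [] => []
  | x :: xs =>
    let sub := if x > L then xs else x :: xs
    let sums := prefixSums 0 sub
    let cut := (firstGT L sums).getD sub.length
    sub.drop cut

-- ===== PRECONDITION & SPEC =====
def Spec_loadCars (L : Int) (q : List Int) (out : List Int) : Prop := out = loadCars_alt L q
instance (L : Int) (q : List Int) (out : List Int) : Decidable (Spec_loadCars L q out) := by unfold Spec_loadCars; infer_instance

-- ===== CLAIM (what is proved, stated in full; the proofs are below) =====
def Claim_equal_loadCars : Prop := ∀ (L : Int) (q : List Int), Dom_loadCars L q → Spec_loadCars L q (loadCars L q)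

-- ===== LEMMAS AND PROOFS =====
theorem loadCarsLoop_eq_drop (L : Int) (ys : List Int) (l : Int) :
    loadCarsLoop L l ys = ys.drop ((firstGT L (prefixSums l ys)).getD ys.length) := by
  induction ys generalizing l with
  | nil => simp [loadCarsLoop, prefixSums, firstGT]
  | cons x xs ih =>
    simp only [loadCarsLoop, prefixSums, firstGT]
    by_cases h : l + x ≤ L
    · have hng : ¬ l + x > L := by omega
      rw [if_pos h, if_neg hng, ih (l + x)]
      cases hfg : firstGT L (prefixSums (l + x) xs) with
      | none => simp
      | some i => simp
    · have hg : l + x > L := by omega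
      rw [if_neg h, if_pos hg]
      simp

-- ===== VERDICT (by name: the statement is the Claim_ definition above) =====
theorem loadCars_spec : Claim_equal_loadCars := by
  intro L q _
  unfold Spec_loadCars loadCars loadCars_alt
  cases q with
  | nil => rfl
  | cons x xs =>
    by_cases h : x > L
    · simp only [if_pos h, loadCarsLoop_eq_drop]
    · simp only [if_neg h, loadCarsLoop_eq_drop]
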